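-- pv_equiv track=rewrite | github.com/jcraig949jfi/Prometheus | prometheus_math/combinatorics_permutations.py | is_pattern_avoiding
-- ===== SOURCE A (Python) =====
-- from typing import Iterable, List, Sequence, Tuple
--
-- Permutation = Tuple[int, ...]
--
-- def _to_tuple(w: Sequence[int]) -> Permutation:
--     """Coerce ``w`` to an immutable tuple, validating it is a permutation
--     of ``{1, ..., n}``."""
--     t = tuple(int(x) for x in w)
--     n = len(t)
--     if n == 0:
--         return t
--     if sorted(t) != list(range(1, n + 1)):
--         raise ValueError(
--             f"not a permutation of (1..{n}): got {t}"
--         )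
--     return t
--
-- def _pattern_validate(p: Sequence[int]) -> Permutation:
--     t = tuple(int(x) for x in p)
--     if len(t) == 0:
--         raise ValueError("pattern must be non-empty")
--     if sorted(t) != list(range(1, len(t) + 1)):
--         raise ValueError(
--             f"pattern must be a permutation of (1..{len(t)}): got {t}"
--         )
--     return t
--
-- def permutation_pattern_count(
--     w: Sequence[int], pattern: Sequence[int]
-- ) -> int:
--     """Count occurrences of ``pattern`` in ``w``.
--
--     A subsequence ``w[i_1] < ... < i_k`` (positions) realizes
--     ``pattern`` iff its relative order (rank-by-value) matches.
--
--     Examples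
--     --------
--     >>> permutation_pattern_count((3, 1, 4, 2), (1, 3, 2))
--     1
--
--     Reference: Bona, "Combinatorics of Permutations" (2nd ed. 2012),
--     Ch. 4.
--     """
--     tw = _to_tuple(w)
--     p = _pattern_validate(pattern)
--     k = len(p)
--     n = len(tw)
--     if k > n:
--         return 0
--     count = 0
--     # Enumerate index k-tuples i_1 < ... < i_k
--     indices = list(range(n))
--     from itertools import combinations
--
--     for combo in combinations(indices, k):
--         sub = [tw[i] for i in combo]
--         # rank-relabel sub
--         sorted_vals = sorted(sub)
--         rank = {v: r + 1 for r, v in enumerate(sorted_vals)}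
--         rel = tuple(rank[v] for v in sub)
--         if rel == p:
--             count += 1
--     return count
--
-- def is_pattern_avoiding(
--     w: Sequence[int], patterns: Iterable[Sequence[int]]
-- ) -> bool:
--     """Return ``True`` iff ``w`` contains none of the given patterns.
--
--     Reference: Bona, "Combinatorics of Permutations" (2nd ed. 2012),
--     Ch. 4. Famous example: ``Av(132)`` in ``S_n`` has size ``C_n``,
--     the n-th Catalan number.
--     """
--     pats = list(patterns)
--     if len(pats) == 0:
--         return True
--     for p in pats:
--         if permutation_pattern_count(w, p) > 0:
--             return False
--     return True
-- ===== SOURCE B (Python) =====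
-- def _check_perm(t, what):
--     """Validate that t is a permutation of 1..len(t) (same contract as the
--     module's validators)."""
--     if sorted(t) != list(range(1, len(t) + 1)):
--         raise ValueError(f"{what} must be a permutation of (1..{len(t)}): got {tuple(t)}")
--
--
-- def _contains(w, p):
--     """Pruned backtracking: try to embed pattern p into w left-to-right,
--     checking the relative-order constraints incrementally."""
--     k = len(p)
--
--     def search(start, chosen):
--         j = len(chosen)
--         if j == k:
--             return True
--         for t in range(start, len(w)):
--             v = w[t]
--             if all((v > chosen[i]) == (p[j] > p[i]) for i in range(j)):
--                 if search(t + 1, chosen + [v]):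
--                     return True
--         return False
--
--     return search(0, [])
--
--
-- def is_pattern_avoiding(w, patterns):
--     wl = None
--     for pat in patterns:
--         if wl is None:
--             wl = [int(x) for x in w]
--             if wl:
--                 _check_perm(wl, "w")
--         p = [int(x) for x in pat]
--         if not p:
--             raise ValueError("pattern must be non-empty")
--         _check_perm(p, "pattern")
--         if _contains(wl, p):
--             return False
--     return True
-- ===== Notes on version B (the rewrite author's own statement) =====
-- stated objective: faster
-- what changed: Replaces A's exhaustive enumeration of all C(n,k) index subsets with rank-relabelling of each one by a short-circuiting recursive backtracking search that extends a partial embedding left-to-right, pruning any choice violating the pattern's pairwise order constraints (validation and its ValueError order are kept); Pre_ excludes the inputs on which A raises ValueError (w or a pattern not a permutation of 1..n, or an empty pattern), which also excludes the corner where an earlier pattern already occurs so A returns False before reaching a later invalid pattern - B returns False there too.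
-- outside the precondition, e.g. on is_pattern_avoiding([2, 1], [[2, 1], [3]]): A returns False, B returns False
import Mathlib
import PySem

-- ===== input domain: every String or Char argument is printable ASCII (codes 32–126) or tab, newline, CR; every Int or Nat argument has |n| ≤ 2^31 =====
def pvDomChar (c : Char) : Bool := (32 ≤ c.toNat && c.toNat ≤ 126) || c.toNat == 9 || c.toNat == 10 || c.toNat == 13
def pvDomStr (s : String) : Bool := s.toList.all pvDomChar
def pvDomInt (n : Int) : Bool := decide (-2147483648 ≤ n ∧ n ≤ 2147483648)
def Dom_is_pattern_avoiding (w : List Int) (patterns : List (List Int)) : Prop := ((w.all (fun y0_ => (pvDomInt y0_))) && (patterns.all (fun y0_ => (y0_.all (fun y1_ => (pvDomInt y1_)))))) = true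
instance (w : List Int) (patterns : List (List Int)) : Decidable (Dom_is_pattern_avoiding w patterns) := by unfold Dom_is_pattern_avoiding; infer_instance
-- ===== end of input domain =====

-- B replaces A's exhaustive enumeration of every C(n,k) index subset (each rank-relabelled and
-- compared to the pattern) by a short-circuiting backtracking search that extends a partial
-- embedding left-to-right under the pattern's pairwise order constraints (objective: faster).

-- ===== PORT A =====
-- _to_tuple / _pattern_validate only validate (they raise ValueError outside Pre_ and otherwise
-- return their argument unchanged), so the ports carry the validated lists directly.

-- rank-relabelling of `sub`: sorted_vals, the rank dict (a dict comprehension = an insert fold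
-- over enumerate), then rel; rank[v] cannot raise KeyError since v ∈ sorted_vals, so getD is exact
def pvRel (sub : List Int) : List Int :=
  let sorted_vals := PySem.List.sorted sub (fun x => x) false
  let rank : PySem.Dict Int Int :=
    (PySem.List.enumerate sorted_vals 0).foldl (fun d rv => d.insert rv.2 (rv.1 + 1)) PySem.Dict.empty
  sub.map (fun v => rank.getD v 0)

def permutation_pattern_count (w : List Int) (pattern : List Int) : Int :=
  let tw := w
  let p := pattern
  let k := p.length
  let n := tw.length
  if k > n then 0
  else
    -- for combo in combinations(range(n), k): indices are in range, so tw[i] = tw.getD i 0 exactly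
    (PySem.List.combinations (List.range n) k).foldl
      (fun count combo =>
        if pvRel (combo.map (fun i => tw.getD i 0)) = p then count + 1 else count) 0

def pvLoopA (w : List Int) : List (List Int) → Bool
  | [] => true
  | p :: rest => if permutation_pattern_count w p > 0 then false else pvLoopA w rest

def is_pattern_avoiding (w : List Int) (patterns : List (List Int)) : Bool :=
  if patterns.length = 0 then true else pvLoopA w patterns

-- ===== PORT B =====
-- Source B keeps the module's validation (it raises ValueError outside Pre_ in the same loop
-- positions as A); inside Pre_ validation passes, so the port carries only the search.
def pvOk (p chosen : List Int) (v : Int) : Bool :=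
  (List.range chosen.length).all
    (fun i => decide (v > chosen.getD i 0) == decide (p.getD chosen.length 0 > p.getD i 0))

def pvSearch (p : List Int) (l : List Int) (chosen : List Int) : Bool :=
  if chosen.length = p.length then true
  else
    match l with
    | [] => false
    | v :: rest =>
        (if pvOk p chosen v then pvSearch p rest (chosen ++ [v]) else false) || pvSearch p rest chosen

def pvContains (w p : List Int) : Bool := pvSearch p w []

def pvLoopB (w : List Int) : List (List Int) → Bool
  | [] => true
  | p :: rest => if pvContains w p then false else pvLoopB w rest

def is_pattern_avoiding_alt (w : List Int) (patterns : List (List Int)) : Bool :=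
  pvLoopB w patterns

-- ===== PRECONDITION & SPEC =====
def pvOneTo (n : Nat) : List Int := (List.range n).map (fun i : Nat => (i : Int) + 1)

-- `l` is a permutation of {1,…,len l} — exactly A's `sorted(t) == list(range(1, n+1))` check
def Perm1N (l : List Int) : Prop := PySem.List.sorted l (fun x => x) false = pvOneTo l.length

-- Pre_ excludes exactly the inputs on which A raises ValueError: a nonempty pattern list with w
-- not a permutation of 1..n, or some pattern empty / not a permutation of 1..k.  (This also
-- excludes the corner where an earlier pattern already occurs, so A returns False before reaching
-- a later invalid pattern; B returns False there too.)
def Pre_is_pattern_avoiding (w : List Int) (patterns : List (List Int)) : Prop :=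
  patterns = [] ∨ (Perm1N w ∧ ∀ p ∈ patterns, p ≠ [] ∧ Perm1N p)
instance (w : List Int) (patterns : List (List Int)) : Decidable (Pre_is_pattern_avoiding w patterns) := by
  unfold Pre_is_pattern_avoiding Perm1N; infer_instance

def pvWitness_is_pattern_avoiding : List Int × List (List Int) := ([2, 1, 3], [[2, 1]])

def Spec_is_pattern_avoiding (w : List Int) (patterns : List (List Int)) (out : Bool) : Prop := out = is_pattern_avoiding_alt w patterns
instance (w : List Int) (patterns : List (List Int)) (out : Bool) : Decidable (Spec_is_pattern_avoiding w patterns out) := by unfold Spec_is_pattern_avoiding; infer_instance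

-- ===== CLAIM (what is proved, stated in full; the proofs are below) =====
def Claim_equal_is_pattern_avoiding : Prop := ∀ (w : List Int) (patterns : List (List Int)), Dom_is_pattern_avoiding w patterns → Pre_is_pattern_avoiding w patterns → Spec_is_pattern_avoiding w patterns (is_pattern_avoiding w patterns)

-- ===== LEMMAS AND PROOFS =====

-- pairwise order-agreement of `s` with the pattern `p` (the invariant of B's backtracking)
def pvG (p s : List Int) : Prop :=
  ∀ i j : Nat, i < j → j < s.length → ((s.getD i 0 < s.getD j 0) ↔ (p.getD i 0 < p.getD j 0))

lemma pv_countP_range_lt (k j : Nat) (h : j ≤ k) :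
    (List.range k).countP (fun i => decide (i < j)) = j := by
  induction k with
  | zero => simp; omega
  | succ k ih =>
    rw [List.range_succ, List.countP_append]
    rcases Nat.lt_or_ge j (k+1) with h1 | h1
    · have : j ≤ k := by omega
      simp [ih this, Nat.not_lt.mpr this]
    · have hj : j = k + 1 := by omega
      subst hj
      have : (List.range k).countP (fun i => decide (i < k+1)) = (List.range k).length := by
        apply List.countP_eq_length.mpr
        intro i hi; simp [List.mem_range] at hi ⊢; omega
      rw [this]; simp

lemma pv_oneTo_nodup (n : Nat) : (pvOneTo n).Nodup := by
  unfold pvOneTo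
  apply List.Nodup.map
  · intro a b hab; simp only at hab; omega
  · exact List.nodup_range

lemma pv_perm1N_perm {l : List Int} (h : Perm1N l) : l.Perm (pvOneTo l.length) := by
  have hp := PySem.List.sorted_perm l (fun x => x) false
  rw [h] at hp
  exact hp.symm

lemma pv_perm1N_nodup {l : List Int} (h : Perm1N l) : l.Nodup :=
  ((pv_perm1N_perm h).nodup_iff).mpr (pv_oneTo_nodup _)

lemma pv_perm1N_rank {p : List Int} (h : Perm1N p) :
    ∀ v ∈ p, (p.countP (fun u => decide (u < v)) : Int) = v - 1 := by
  have hperm := pv_perm1N_perm h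
  intro v hv
  rw [hperm.countP_eq]
  have hv' : v ∈ pvOneTo p.length := hperm.mem_iff.mp hv
  unfold pvOneTo at hv' ⊢
  obtain ⟨j, hj, hje⟩ := List.mem_map.mp hv'
  subst hje
  rw [List.countP_map]
  have hcongr : (List.range p.length).countP ((fun u => decide (u < (j : Int) + 1)) ∘ (fun i : Nat => (i : Int) + 1))
      = (List.range p.length).countP (fun i : Nat => decide (i < j)) := by
    apply List.countP_congr
    intro i _
    simp only [Function.comp_apply, decide_eq_true_eq]
    constructor <;> intro <;> omega
  rw [hcongr, pv_countP_range_lt _ _ (le_of_lt (List.mem_range.mp hj))]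
  omega

-- ---------- A side: the rank relabelling ----------

lemma pv_rankDict_getD_not (sv : List Int) (st : Int) (d : PySem.Dict Int Int) (v : Int)
    (hv : v ∉ sv) :
    ((PySem.List.enumerate sv st).foldl (fun d rv => d.insert rv.2 (rv.1 + 1)) d).getD v 0
      = d.getD v 0 := by
  induction sv generalizing st d with
  | nil => simp [PySem.List.enumerate_nil]
  | cons a t ih =>
    rw [PySem.List.enumerate_cons, List.foldl_cons]
    rw [ih (st + 1) _ (fun hm => hv (List.mem_cons_of_mem _ hm))]
    exact PySem.Dict.getD_insert_of_ne d _ _ (fun he => hv (he ▸ List.mem_cons_self))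

lemma pv_rankDict_getD (sv : List Int) (st : Int) (d : PySem.Dict Int Int) (v : Int)
    (hnd : sv.Nodup) (hv : v ∈ sv) :
    ((PySem.List.enumerate sv st).foldl (fun d rv => d.insert rv.2 (rv.1 + 1)) d).getD v 0
      = st + (sv.idxOf v : Int) + 1 := by
  induction sv generalizing st d with
  | nil => simp at hv
  | cons a t ih =>
    rw [PySem.List.enumerate_cons, List.foldl_cons]
    by_cases hva : v = a
    · subst hva
      have hnt : v ∉ t := (List.nodup_cons.mp hnd).1
      rw [pv_rankDict_getD_not t (st + 1) _ v hnt, PySem.Dict.getD_insert_self]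
      simp [List.idxOf_cons_self]
    · have hvt : v ∈ t := by
        rcases List.mem_cons.mp hv with h | h
        · exact absurd h hva
        · exact h
      rw [ih (st + 1) _ (List.nodup_cons.mp hnd).2 hvt]
      rw [List.idxOf_cons_ne _ (Ne.symm hva)]
      push_cast; ring

lemma pv_idxOf_sorted_strict (sv : List Int) (hss : sv.Pairwise (· < ·)) (v : Int) (hv : v ∈ sv) :
    sv.idxOf v = sv.countP (fun u => decide (u < v)) := by
  induction sv with
  | nil => simp at hv
  | cons a t ih =>
    have hat : ∀ u ∈ t, a < u := (List.pairwise_cons.mp hss).1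
    by_cases hva : v = a
    · have hcz : (a :: t).countP (fun u => decide (u < v)) = 0 := by
        apply List.countP_eq_zero.mpr
        intro u hu
        rcases List.mem_cons.mp hu with h | h
        · subst h; simp [hva]
        · have := hat u h; simp; omega
      rw [hcz, hva, List.idxOf_cons_self]
    · have hvt : v ∈ t := by
        rcases List.mem_cons.mp hv with h | h
        · exact absurd h hva
        · exact h
      rw [List.idxOf_cons_ne _ (Ne.symm hva), List.countP_cons]
      have hav : a < v := hat v hvt
      rw [ih (List.pairwise_cons.mp hss).2 hvt]
      simp [hav]

lemma pv_rel_char (s : List Int) (hs : s.Nodup) :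
    pvRel s = s.map (fun v => (s.countP (fun u => decide (u < v)) : Int) + 1) := by
  unfold pvRel
  apply List.map_congr_left
  intro v hv
  set sv := PySem.List.sorted s (fun x => x) false with hsv
  have hperm : sv.Perm s := PySem.List.sorted_perm s (fun x => x) false
  have hsvnd : sv.Nodup := (hperm.nodup_iff).mpr hs
  have hsvmem : v ∈ sv := hperm.mem_iff.mpr hv
  have hsvlt : sv.Pairwise (· < ·) := by
    have hle : sv.Pairwise (· ≤ ·) := PySem.List.sorted_pairwise s (fun x => x)
    exact (List.Pairwise.and hle hsvnd).imp (fun h => lt_of_le_of_ne h.1 h.2)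
  rw [pv_rankDict_getD sv 0 _ v hsvnd hsvmem]
  rw [pv_idxOf_sorted_strict sv hsvlt v hsvmem]
  rw [hperm.countP_eq]
  ring

-- counting elements is counting indices
lemma pv_countP_index (f : Int → Bool) (l : List Int) :
    l.countP f = (List.range l.length).countP (fun j => f (l.getD j 0)) := by
  induction l with
  | nil => simp
  | cons x t ih =>
    rw [List.countP_cons, List.length_cons, List.range_succ_eq_map, List.countP_cons,
        List.countP_map]
    have : (List.range t.length).countP ((fun j => f ((x :: t).getD j 0)) ∘ Nat.succ)
        = (List.range t.length).countP (fun j => f (t.getD j 0)) := by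
      apply List.countP_congr
      intro i _
      rfl
    rw [this, ← ih]
    simp only [List.getD_cons_zero]

lemma pv_countP_lt_strict (s : List Int) (_hs : s.Nodup) (a b : Int)
    (ha : a ∈ s) (hab : a < b) :
    s.countP (fun u => decide (u < a)) < s.countP (fun u => decide (u < b)) := by
  rw [List.countP_eq_length_filter, List.countP_eq_length_filter]
  have hsub : (s.filter (fun u => decide (u < a))).Sublist (s.filter (fun u => decide (u < b))) := by
    apply List.monotone_filter_right
    intro u hu
    simp at hu ⊢; omega
  have hle := hsub.length_le
  rcases Nat.lt_or_ge (s.filter (fun u => decide (u < a))).length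
      (s.filter (fun u => decide (u < b))).length with h | h
  · exact h
  · exfalso
    have heq := hsub.eq_of_length (by omega)
    have hma : a ∈ s.filter (fun u => decide (u < b)) := by
      simp [List.mem_filter, ha]; omega
    rw [← heq] at hma
    simp [List.mem_filter] at hma

lemma pv_lt_iff_rank_lt (s : List Int) (hs : s.Nodup) (a b : Int) (ha : a ∈ s) (hb : b ∈ s) :
    (a < b) ↔ s.countP (fun u => decide (u < a)) < s.countP (fun u => decide (u < b)) := by
  constructor
  · exact pv_countP_lt_strict s hs a b ha
  · intro h
    rcases lt_trichotomy a b with h1 | h1 | h1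
    · exact h1
    · subst h1; omega
    · have := pv_countP_lt_strict s hs b a hb h1; omega

-- ---------- the crux: rank relabelling = pairwise order agreement ----------

lemma pv_rank_main (s p : List Int) (hs : s.Nodup) (hlen : s.length = p.length)
    (hp : Perm1N p) : (pvRel s = p ↔ pvG p s) := by
  rw [pv_rel_char s hs]
  have hpnd : p.Nodup := pv_perm1N_nodup hp
  have hrank := pv_perm1N_rank hp
  have hgetD : ∀ i : Nat, i < s.length →
      (s.map (fun v => (s.countP (fun u => decide (u < v)) : Int) + 1)).getD i 0
        = (s.countP (fun u => decide (u < s.getD i 0)) : Int) + 1 := by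
    intro i hi
    rw [List.getD_eq_getElem _ _ (by simpa using hi), List.getElem_map,
        List.getD_eq_getElem _ _ hi]
  constructor
  · -- ranks equal the pattern → pairwise agreement
    intro heq i j hij hj
    have hjs : j < s.length := hj
    have his : i < s.length := lt_trans hij hj
    have hpi : p.getD i 0 = (s.countP (fun u => decide (u < s.getD i 0)) : Int) + 1 := by
      rw [← heq]; exact hgetD i his
    have hpj : p.getD j 0 = (s.countP (fun u => decide (u < s.getD j 0)) : Int) + 1 := by
      rw [← heq]; exact hgetD j hjs
    rw [hpi, hpj]
    have hiff := pv_lt_iff_rank_lt s hs (s.getD i 0) (s.getD j 0)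
      (by rw [List.getD_eq_getElem _ _ his]; exact List.getElem_mem _)
      (by rw [List.getD_eq_getElem _ _ hjs]; exact List.getElem_mem _)
    rw [hiff]
    constructor <;> intro h <;> omega
  · -- pairwise agreement → ranks equal the pattern
    intro hG
    apply List.ext_getElem
    · simp [hlen]
    · intro i hi1 hi2
      rw [List.getElem_map]
      have his : i < s.length := by simpa using hi1
      have hip : i < p.length := hi2
      have hcount : s.countP (fun u => decide (u < s[i])) = p.countP (fun u => decide (u < p[i])) := by
        rw [pv_countP_index _ s, pv_countP_index _ p, hlen]
        apply List.countP_congr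
        intro j hj
        have hjp : j < p.length := List.mem_range.mp hj
        have hjs : j < s.length := by omega
        simp only [decide_eq_true_eq]
        rw [List.getD_eq_getElem _ _ hjs, List.getD_eq_getElem _ _ hjp]
        rcases lt_trichotomy j i with h1 | h1 | h1
        · have hGji := hG j i h1 his
          rw [List.getD_eq_getElem _ _ hjs, List.getD_eq_getElem _ _ his,
              List.getD_eq_getElem _ _ hjp, List.getD_eq_getElem _ _ hip] at hGji
          constructor <;> intro h
          · exact hGji.mp h
          · exact hGji.mpr h
        · subst h1
          constructor <;> intro h <;> omega
        · have hGij := hG i j h1 hjs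
          rw [List.getD_eq_getElem _ _ his, List.getD_eq_getElem _ _ hjs,
              List.getD_eq_getElem _ _ hip, List.getD_eq_getElem _ _ hjp] at hGij
          have hsne : s[i] ≠ s[j] := fun he => by
            have := (hs.getElem_inj_iff).mp he; omega
          have hpne : p[i] ≠ p[j] := fun he => by
            have := (hpnd.getElem_inj_iff).mp he; omega
          constructor <;> intro h
          · by_contra hc
            have h2 : p[i] < p[j] := by omega
            have := hGij.mpr h2; omega
          · by_contra hc
            have h2 : s[i] < s[j] := by omega
            have := hGij.mp h2; omega
      have hmem : p[i] ∈ p := List.getElem_mem _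
      have hr := hrank p[i] hmem
      rw [← List.getD_eq_getElem s 0 his] at hcount
      rw [← List.getD_eq_getElem s 0 his, hcount]
      omega

-- ---------- A side: count > 0 iff some sublist rank-matches ----------

lemma pv_map_getD_range (w : List Int) :
    (List.range w.length).map (fun i => w.getD i 0) = w := by
  apply List.ext_getElem
  · simp
  · intro i hi1 hi2
    simp only [List.getElem_map, List.getElem_range]
    exact List.getD_eq_getElem w 0 hi2

lemma pv_count_pos_iff (w p : List Int) :
    (0 < permutation_pattern_count w p) ↔
      ∃ s, s.Sublist w ∧ s.length = p.length ∧ pvRel s = p := by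
  unfold permutation_pattern_count
  simp only
  by_cases hk : p.length > w.length
  · rw [if_pos hk]
    constructor
    · intro h; omega
    · rintro ⟨s, hsub, hlen, -⟩
      have := hsub.length_le; omega
  · rw [if_neg hk]
    rw [PySem.List.foldl_ite_add_one
      (fun combo : List Nat => pvRel (List.map (fun i => w.getD i 0) combo) = p)
      (PySem.List.combinations (List.range w.length) p.length) 0]
    rw [zero_add]
    rw [Int.natCast_pos, List.countP_pos_iff]
    constructor
    · rintro ⟨combo, hmem, hrel⟩
      refine ⟨combo.map (fun i => w.getD i 0), ?_, ?_, by simpa using hrel⟩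
      · have : combo.map (fun i => w.getD i 0) ∈
            PySem.List.combinations ((List.range w.length).map (fun i => w.getD i 0)) p.length := by
          rw [PySem.List.combinations_map]
          exact List.mem_map_of_mem hmem
        rw [pv_map_getD_range] at this
        exact ((PySem.List.mem_combinations_iff _ _ _).mp this).1
      · have := ((PySem.List.mem_combinations_iff _ _ _).mp hmem).2
        simp [this]
    · rintro ⟨s, hsub, hlen, hrel⟩
      have hmem : s ∈ PySem.List.combinations w p.length :=
        (PySem.List.mem_combinations_iff _ _ _).mpr ⟨hsub, hlen⟩
      rw [← pv_map_getD_range w, PySem.List.combinations_map] at hmem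
      obtain ⟨combo, hcm, hce⟩ := List.mem_map.mp hmem
      exact ⟨combo, hcm, by simp only [decide_eq_true_eq]; rw [hce]; exact hrel⟩

-- ---------- B side: the backtracking search ----------

lemma pv_getD_append_last (a : List Int) (v d : Int) : (a ++ [v]).getD a.length d = v := by
  simp [List.getD_eq_getElem?_getD]

lemma pv_ok_iff (p chosen : List Int) (v : Int) :
    pvOk p chosen v = true ↔
      ∀ i : Nat, i < chosen.length →
        ((chosen.getD i 0 < v) ↔ (p.getD i 0 < p.getD chosen.length 0)) := by
  unfold pvOk
  rw [List.all_eq_true]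
  constructor
  · intro h i hi
    have := h i (List.mem_range.mpr hi)
    simp only [beq_iff_eq, decide_eq_decide] at this
    constructor <;> intro hh
    · exact this.mp hh
    · exact this.mpr hh
  · intro h i hi
    have := h i (List.mem_range.mp hi)
    simp only [beq_iff_eq, decide_eq_decide]
    constructor <;> intro hh
    · exact this.mp hh
    · exact this.mpr hh

lemma pv_G_prefix (p a b : List Int) (h : pvG p (a ++ b)) : pvG p a := by
  intro i j hij hj
  have hj' : j < (a ++ b).length := by simp; omega
  have := h i j hij hj'
  rw [List.getD_append _ _ _ _ (by omega), List.getD_append _ _ _ _ hj] at this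
  exact this

lemma pv_ok_iff_G (p chosen : List Int) (v : Int) (hG : pvG p chosen) :
    (pvOk p chosen v = true) ↔ pvG p (chosen ++ [v]) := by
  rw [pv_ok_iff]
  constructor
  · intro h i j hij hj
    simp only [List.length_append, List.length_cons, List.length_nil] at hj
    by_cases hje : j = chosen.length
    · subst hje
      rw [List.getD_append _ _ _ _ hij, pv_getD_append_last]
      exact h i hij
    · have hj' : j < chosen.length := by omega
      rw [List.getD_append _ _ _ _ (by omega), List.getD_append _ _ _ _ hj']
      exact hG i j hij hj'
  · intro h i hi
    have := h i chosen.length hi (by simp)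
    rw [List.getD_append _ _ _ _ hi, pv_getD_append_last] at this
    exact this

lemma pv_search_iff (p : List Int) (l : List Int) : ∀ chosen : List Int,
    chosen.length ≤ p.length → pvG p chosen →
    (pvSearch p l chosen = true ↔
      ∃ ext, ext.Sublist l ∧ chosen.length + ext.length = p.length ∧ pvG p (chosen ++ ext)) := by
  induction l with
  | nil =>
    intro chosen hle hG
    rw [pvSearch]
    by_cases heq : chosen.length = p.length
    · rw [if_pos heq]
      simp only [true_iff]
      exact ⟨[], List.nil_sublist _, by simp [heq], by simpa using hG⟩
    · rw [if_neg heq]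
      show false = true ↔ _
      simp only [Bool.false_eq_true, false_iff]
      rintro ⟨ext, hsub, hlen, -⟩
      rw [List.sublist_nil.mp hsub] at hlen
      simp at hlen; omega
  | cons v rest ih =>
    intro chosen hle hG
    rw [pvSearch]
    by_cases heq : chosen.length = p.length
    · rw [if_pos heq]
      simp only [true_iff]
      exact ⟨[], List.nil_sublist _, by simp [heq], by simpa using hG⟩
    · rw [if_neg heq]
      have hlt : chosen.length < p.length := by omega
      have hsplit : (∃ ext, ext.Sublist (v :: rest) ∧ chosen.length + ext.length = p.length ∧
          pvG p (chosen ++ ext)) ↔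
          ((∃ ext, ext.Sublist rest ∧ chosen.length + ext.length = p.length ∧ pvG p (chosen ++ ext)) ∨
           (∃ r, r.Sublist rest ∧ (chosen ++ [v]).length + r.length = p.length ∧
             pvG p ((chosen ++ [v]) ++ r))) := by
        constructor
        · rintro ⟨ext, hsub, hlen, hGe⟩
          rcases List.sublist_cons_iff.mp hsub with h | ⟨r, rfl, hr⟩
          · exact Or.inl ⟨ext, h, hlen, hGe⟩
          · refine Or.inr ⟨r, hr, ?_, ?_⟩
            · simp at hlen ⊢; omega
            · rw [← List.append_cons]; exact hGe
        · rintro (⟨ext, hsub, hlen, hGe⟩ | ⟨r, hr, hlen, hGe⟩)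
          · exact ⟨ext, hsub.cons _, hlen, hGe⟩
          · refine ⟨v :: r, List.cons_sublist_cons.mpr hr, ?_, ?_⟩
            · simp at hlen ⊢; omega
            · rw [List.append_cons]; exact hGe
      rw [hsplit]
      by_cases hok : pvOk p chosen v = true
      · rw [if_pos hok]
        have hG' : pvG p (chosen ++ [v]) := (pv_ok_iff_G p chosen v hG).mp hok
        have hle' : (chosen ++ [v]).length ≤ p.length := by simp; omega
        rw [Bool.or_eq_true, ih chosen hle hG, ih (chosen ++ [v]) hle' hG']
        exact or_comm
      · rw [if_neg hok]
        rw [Bool.false_or, ih chosen hle hG]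
        constructor
        · intro h; exact Or.inl h
        · rintro (h | ⟨r, hr, hlen, hGe⟩)
          · exact h
          · exfalso
            apply hok
            apply (pv_ok_iff_G p chosen v hG).mpr
            exact pv_G_prefix p (chosen ++ [v]) r hGe

lemma pv_contains_iff (w p : List Int) :
    pvContains w p = true ↔ ∃ s, s.Sublist w ∧ s.length = p.length ∧ pvG p s := by
  unfold pvContains
  rw [pv_search_iff p w [] (by simp) (by intro i j hij hj; simp at hj)]
  simp

-- ---------- per pattern, then the loops ----------

lemma pv_pattern_iff (w p : List Int) (hw : Perm1N w) (hp : Perm1N p) :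
    (0 < permutation_pattern_count w p) ↔ pvContains w p = true := by
  rw [pv_count_pos_iff, pv_contains_iff]
  have hwnd := pv_perm1N_nodup hw
  constructor
  · rintro ⟨s, hsub, hlen, hrel⟩
    refine ⟨s, hsub, hlen, ?_⟩
    exact (pv_rank_main s p (hwnd.sublist hsub) hlen hp).mp hrel
  · rintro ⟨s, hsub, hlen, hGe⟩
    refine ⟨s, hsub, hlen, ?_⟩
    exact (pv_rank_main s p (hwnd.sublist hsub) hlen hp).mpr hGe

lemma pv_loop_eq (w : List Int) (pats : List (List Int)) (hw : Perm1N w)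
    (hall : ∀ p ∈ pats, p ≠ [] ∧ Perm1N p) : pvLoopA w pats = pvLoopB w pats := by
  induction pats with
  | nil => rfl
  | cons p rest ih =>
    have hp := (hall p (List.mem_cons_self)).2
    have hiff := pv_pattern_iff w p hw hp
    rw [pvLoopA, pvLoopB]
    by_cases h : 0 < permutation_pattern_count w p
    · rw [if_pos h, hiff.mp h, if_pos rfl]
    · rw [if_neg h]
      have : pvContains w p ≠ true := fun hc => h (hiff.mpr hc)
      simp only [Bool.not_eq_true] at this
      rw [this]
      simp only [Bool.false_eq_true, if_false]
      exact ih (fun q hq => hall q (List.mem_cons_of_mem _ hq))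

-- ===== VERDICT (by name: the statement is the Claim_ definition above) =====
theorem is_pattern_avoiding_spec : Claim_equal_is_pattern_avoiding := by
  intro w pats _ hpre
  unfold Spec_is_pattern_avoiding is_pattern_avoiding is_pattern_avoiding_alt
  rcases hpre with rfl | ⟨hw, hall⟩
  · simp [pvLoopB]
  · by_cases hnil : pats.length = 0
    · rw [if_pos hnil, List.length_eq_zero_iff.mp hnil]; rfl
    · rw [if_neg hnil]
      exact pv_loop_eq w pats hw hall
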